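-- pv_equiv track=rewrite | github.com/sloppynacho/Py4GW | Widgets/Automation/Bots/Farmers/Titles/Sunspear title farm.py | _humanize_hero_name
-- ===== SOURCE A (Python) =====
-- from typing import List, Dict, Optional
--
-- def _humanize_hero_name(enum_name: str) -> str:
--     if enum_name == "None_":
--         return "<Empty>"
--     words: List[str] = []
--     current = enum_name[0]
--     for char in enum_name[1:]:
--         if (char.isupper() and not current[-1].isupper()) or (char.isdigit() and not current[-1].isdigit()):
--             words.append(current)
--             current = char
--         else:
--             current += char
--     words.append(current)
--     return " ".join(words)
-- ===== SOURCE B (Python) =====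
-- def _humanize_hero_name(enum_name: str) -> str:
--     if enum_name == "None_":
--         return "<Empty>"
--     cuts = [i for i in range(1, len(enum_name))
--             if (enum_name[i].isupper() and not enum_name[i - 1].isupper())
--             or (enum_name[i].isdigit() and not enum_name[i - 1].isdigit())]
--     bounds = [0] + cuts + [len(enum_name)]
--     return " ".join(enum_name[a:b] for a, b in zip(bounds, bounds[1:]))
-- ===== Notes on version B (the rewrite author's own statement) =====
-- stated objective: alternative
-- what changed: B works in two staged passes — first it collects the list of all cut indices by filtering range(1, len), then it slices the string between consecutive bounds and joins the slices — instead of A's single scan that accretes characters into a current-word accumulator and a words list.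
import Mathlib
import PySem

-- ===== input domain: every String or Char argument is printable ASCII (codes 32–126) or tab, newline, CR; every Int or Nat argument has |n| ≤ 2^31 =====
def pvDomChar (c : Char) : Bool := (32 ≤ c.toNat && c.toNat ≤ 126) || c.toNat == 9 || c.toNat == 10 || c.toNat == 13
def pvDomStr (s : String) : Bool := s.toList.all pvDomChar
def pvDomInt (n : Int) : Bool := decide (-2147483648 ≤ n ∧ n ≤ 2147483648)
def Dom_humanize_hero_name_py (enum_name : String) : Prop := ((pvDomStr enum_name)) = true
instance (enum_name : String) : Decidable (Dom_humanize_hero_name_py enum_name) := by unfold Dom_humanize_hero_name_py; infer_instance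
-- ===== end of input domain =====

-- B computes the humanized name in two staged passes — first collect the list of cut indices,
-- then slice the string at consecutive bounds and join — instead of A's accumulator scan.


-- ===== PORT A =====
-- the loop 'for char in enum_name[1:]' with state (words, current); current[-1] is pyGetD current (-1)
def pvAloop : List Char → List (List Char) → List Char → List (List Char)
  | [], words, current => words ++ [current]
  | ch :: rest, words, current =>
    if (PySem.Chars.isupper ch && !PySem.Chars.isupper (PySem.List.pyGetD current (-1) ' '))
        || (PySem.Chars.isdigit ch && !PySem.Chars.isdigit (PySem.List.pyGetD current (-1) ' ')) then
      pvAloop rest (words ++ [current]) [ch]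
    else
      pvAloop rest words (current ++ [ch])

def humanize_hero_name_py (enum_name : String) : String :=
  if enum_name = "None_" then "<Empty>" else
  match enum_name.toList with
  | [] => ""            -- enum_name[0] raises IndexError in Python: excluded by Pre_
  | c :: rest => String.ofList (PySem.Chars.join [' '] (pvAloop rest [] [c]))

-- ===== PORT B =====
-- Source B's boundary test at index i of l
def pvIsCut (l : List Char) (i : Int) : Bool :=
  (PySem.Chars.isupper (PySem.List.pyGetD l i ' ') && !PySem.Chars.isupper (PySem.List.pyGetD l (i-1) ' '))
    || (PySem.Chars.isdigit (PySem.List.pyGetD l i ' ') && !PySem.Chars.isdigit (PySem.List.pyGetD l (i-1) ' '))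

-- pass 1: cuts = [i for i in range(1, len) if <boundary>]; pass 2: slice between consecutive bounds and join
def humanize_hero_name_py_alt (enum_name : String) : String :=
  if enum_name = "None_" then "<Empty>" else
  let l := enum_name.toList
  let n : Int := l.length
  let cuts : List Int := (PySem.List.pyRange 1 n 1).filter (pvIsCut l)
  let bounds : List Int := 0 :: (cuts ++ [n])
  String.ofList (PySem.Chars.join [' ']
    ((List.zip bounds (cuts ++ [n])).map (fun ab => PySem.List.slice l (some ab.1) (some ab.2))))

-- ===== PRECONDITION & SPEC =====
-- A raises IndexError on the empty string (enum_name[0]); only that input is excluded.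
def Pre_humanize_hero_name_py (enum_name : String) : Prop := enum_name ≠ ""
instance (enum_name : String) : Decidable (Pre_humanize_hero_name_py enum_name) := by unfold Pre_humanize_hero_name_py; infer_instance
def pvWitness_humanize_hero_name_py : String := "SunspearTitle1"
def Spec_humanize_hero_name_py (enum_name : String) (out : String) : Prop := out = humanize_hero_name_py_alt enum_name
instance (enum_name : String) (out : String) : Decidable (Spec_humanize_hero_name_py enum_name out) := by unfold Spec_humanize_hero_name_py; infer_instance

-- ===== CLAIM (what is proved, stated in full; the proofs are below) =====
def Claim_equal_humanize_hero_name_py : Prop := ∀ (enum_name : String), Dom_humanize_hero_name_py enum_name → Pre_humanize_hero_name_py enum_name → Spec_humanize_hero_name_py enum_name (humanize_hero_name_py enum_name)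

-- ===== LEMMAS AND PROOFS =====
-- boundary predicate between the previous char p and the next char c
def pvBnd (p c : Char) : Bool :=
  (PySem.Chars.isupper c && !PySem.Chars.isupper p)
    || (PySem.Chars.isdigit c && !PySem.Chars.isdigit p)

-- canonical word splitter: state (previous char, current word)
def pvSplit (p : Char) (cur : List Char) : List Char → List (List Char)
  | [] => [cur]
  | c :: rest => if pvBnd p c then cur :: pvSplit c [c] rest else pvSplit c (cur ++ [c]) rest

theorem pvAloop_eq_split (rest : List Char) (words : List (List Char)) (cur : List Char)
    (h : cur ≠ []) :
    pvAloop rest words cur = words ++ pvSplit (cur.getLast h) cur rest := by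
  induction rest generalizing words cur with
  | nil => simp [pvAloop, pvSplit]
  | cons ch rest ih =>
    simp only [pvAloop, pvSplit, PySem.List.pyGetD_neg_one cur ' ' h, pvBnd]
    split
    · rw [ih (words ++ [cur]) [ch] (by simp)]
      simp
    · rw [ih words (cur ++ [ch]) (by simp)]
      simp

-- pass-2 of B as a structural recursion on the (Nat) cut list
def pvWordsAt (l : List Char) (a : Nat) : List Nat → List (List Char)
  | [] => [(l.drop a).take (l.length - a)]
  | c :: cs => (l.drop a).take (c - a) :: pvWordsAt l c cs

-- B's zip-of-bounds slicing equals pvWordsAt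
theorem pvZip_slices_eq_wordsAt (l : List Char) (a : Nat) (cs : List Nat) :
    (List.zip ((a : Int) :: (List.map (fun (k : Nat) => (k : Int)) cs ++ [(l.length : Int)]))
        (List.map (fun (k : Nat) => (k : Int)) cs ++ [(l.length : Int)])).map
      (fun ab => PySem.List.slice l (some ab.1) (some ab.2)) = pvWordsAt l a cs := by
  induction cs generalizing a with
  | nil => simp [pvWordsAt, PySem.List.slice_natCast]
  | cons c cs ih =>
    simp only [List.map_cons, List.cons_append, List.zip_cons_cons,
      PySem.List.slice_natCast, pvWordsAt]
    exact congrArg _ (ih c)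

-- the cut positions of l from index j onward (Nat side)
def pvCutsFrom (l : List Char) (j : Nat) : List Nat :=
  (List.range' j (l.length - j)).filter (fun i => pvBnd (l.getD (i - 1) ' ') (l.getD i ' '))

-- the canonical splitter equals slicing at the cut positions
theorem pvSplit_eq_wordsAt (l : List Char) (j a : Nat) (h1 : 1 ≤ j) (ha : a ≤ j)
    (hj : j ≤ l.length) :
    pvSplit (l.getD (j - 1) ' ') ((l.drop a).take (j - a)) (l.drop j)
      = pvWordsAt l a (pvCutsFrom l j) := by
  by_cases hlt : j < l.length
  · have hdrop : l.drop j = l[j] :: l.drop (j + 1) := List.drop_eq_getElem_cons hlt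
    have hrange : List.range' j (l.length - j) = j :: List.range' (j + 1) (l.length - (j + 1)) := by
      have : l.length - j = (l.length - (j + 1)) + 1 := by omega
      rw [this, List.range'_succ]
    have hgetj : l.getD j ' ' = l[j] := by
      simp [List.getD_eq_getElem?_getD, List.getElem?_eq_getElem hlt]
    rw [hdrop]
    simp only [pvSplit, pvCutsFrom, hrange, List.filter_cons, hgetj]
    by_cases hb : pvBnd (l.getD (j - 1) ' ') l[j] = true
    · simp only [hb, if_pos trivial]
      refine congrArg _ ?_
      have := pvSplit_eq_wordsAt l (j + 1) j (by omega) (by omega) (by omega)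
      rw [show (l.drop j).take (j + 1 - j) = [l[j]] by
            rw [show j + 1 - j = 1 by omega, hdrop, List.take_succ_cons, List.take_zero],
        show l.getD (j + 1 - 1) ' ' = l[j] by simpa using hgetj] at this
      exact this
    · simp only [hb, if_neg, Bool.false_eq_true, not_false_iff]
      have := pvSplit_eq_wordsAt l (j + 1) a (by omega) (by omega) (by omega)
      rw [show (l.drop a).take (j + 1 - a) = (l.drop a).take (j - a) ++ [l[j]] by
            rw [show j + 1 - a = (j - a) + 1 by omega, List.take_add_one]
            congr 1
            rw [List.getElem?_drop, show a + (j - a) = j by omega,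
              List.getElem?_eq_getElem hlt]
            rfl,
        show l.getD (j + 1 - 1) ' ' = l[j] by simpa using hgetj] at this
      exact this
  · have hje : j = l.length := by omega
    subst hje
    simp [pvSplit, pvCutsFrom, pvWordsAt]
termination_by l.length - j

-- B's Int cut list is the cast of the Nat cut list
theorem pvCuts_int_eq (l : List Char) :
    List.filter (pvIsCut l) (PySem.List.pyRange 1 (l.length : Int) 1)
      = List.map (fun (k : Nat) => (k : Int)) (pvCutsFrom l 1) := by
  rw [PySem.List.pyRange_one, List.filter_map, pvCutsFrom, List.range'_eq_map_range,
    List.filter_map, List.map_map,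
    show ((l.length : Int) - 1).toNat = l.length - 1 by omega]
  congr 1
  · apply List.filter_congr
    intro k _
    simp only [Function.comp_apply, pvIsCut]
    rw [show (1 : Int) + (k : Int) - 1 = ((k : Nat) : Int) by omega,
      show (1 : Int) + (k : Int) = ((1 + k : Nat) : Int) by push_cast; ring]
    simp only [PySem.List.pyGetD_natCast, pvBnd, Nat.add_sub_cancel_left]

-- ===== VERDICT (by name: the statement is the Claim_ definition above) =====
theorem humanize_hero_name_py_spec : Claim_equal_humanize_hero_name_py := by
  intro s _ hpre
  unfold Spec_humanize_hero_name_py humanize_hero_name_py humanize_hero_name_py_alt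
  split
  · rfl
  · cases hls : s.toList with
    | nil => exact absurd (by simpa using congrArg String.ofList hls) hpre
    | cons c rest =>
      simp only [hls]
      have hA := pvAloop_eq_split rest [] [c] (by simp)
      have key := pvSplit_eq_wordsAt (c :: rest) 1 0 le_rfl (by omega) (by simp)
      rw [show (1 : Nat) - 1 = 0 by omega, show (1 : Nat) - 0 = 1 by omega] at key
      simp only [List.getD_cons_zero, List.drop_zero, List.drop_one, List.tail_cons] at key
      rw [show List.take 1 (c :: rest) = [c] from rfl] at key
      rw [hA, List.nil_append, List.getLast_singleton, key,
        pvCuts_int_eq (c :: rest),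
        show ((0 : Int)) = (((0 : Nat)) : Int) from rfl,
        pvZip_slices_eq_wordsAt (c :: rest) 0 (pvCutsFrom (c :: rest) 1)]
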